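-- pv_equiv track=rewrite | github.com/jaketaylor54/my-career-chatbot | app.py | is_start_questions_request
-- ===== SOURCE A (Python) =====
-- def is_start_questions_request(message):
--     message_lower = message.lower()
--     start_keywords = [
--         "ask me some questions", "generate job recommendations for me", "start questions",
--         "begin recommendations", "start the process", "begin the process",
--         "career questions", "start career questions", "let's begin"
--     ]
--     for keyword_phrase in start_keywords:
--         if keyword_phrase in message_lower:
--             return True
--     return False
-- ===== SOURCE B (Python) =====
-- def is_start_questions_request(message):
--     start_keywords = [
--         "ask me some questions", "generate job recommendations for me", "start questions",
--         "begin recommendations", "start the process", "begin the process",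
--         "career questions", "start career questions", "let's begin"
--     ]
--     m = message.lower()
--     # single left-to-right scan: at each position, test whether any keyword starts there
--     for i in range(len(m) + 1):
--         for kw in start_keywords:
--             if m.startswith(kw, i):
--                 return True
--     return False
-- ===== Notes on version B (the rewrite author's own statement) =====
-- stated objective: alternative
-- what changed: B replaces A's phrase-by-phrase substring membership checks with a single position-by-position scan of the lowercased message, testing at each index whether any keyword starts there (a naive multi-pattern matcher).
import Mathlib
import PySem

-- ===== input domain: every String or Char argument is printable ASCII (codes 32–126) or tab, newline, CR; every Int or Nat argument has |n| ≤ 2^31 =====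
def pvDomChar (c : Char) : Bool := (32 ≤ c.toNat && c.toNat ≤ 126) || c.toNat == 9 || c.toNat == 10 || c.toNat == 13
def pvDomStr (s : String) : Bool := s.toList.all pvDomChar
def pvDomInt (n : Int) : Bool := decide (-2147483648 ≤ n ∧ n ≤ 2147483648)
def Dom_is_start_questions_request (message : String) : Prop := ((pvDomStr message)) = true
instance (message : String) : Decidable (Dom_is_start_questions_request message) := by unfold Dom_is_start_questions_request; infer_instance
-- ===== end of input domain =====

-- B replaces A's phrase-by-phrase substring checks with a single position-by-position
-- scan testing at each index whether any keyword starts there (alternative, same result).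

-- the shared keyword list (as lists of chars)
def pvStartKeywords : List (List Char) :=
  [ "ask me some questions".toList, "generate job recommendations for me".toList,
    "start questions".toList, "begin recommendations".toList, "start the process".toList,
    "begin the process".toList, "career questions".toList, "start career questions".toList,
    "let's begin".toList ]

-- ===== PORT A =====
-- for kw in start_keywords: if kw in message_lower: return True; return False
def is_start_questions_request (message : String) : Bool :=
  let messageLower := PySem.Chars.lower message.toList
  pvStartKeywords.any (fun kw => PySem.Chars.isIn kw messageLower)

-- ===== PORT B =====
-- for i in range(len(m)+1): for kw in keywords: if m.startswith(kw, i): return True; return False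
def is_start_questions_request_alt (message : String) : Bool :=
  let m := PySem.Chars.lower message.toList
  (List.range (m.length + 1)).any
    (fun i => pvStartKeywords.any (fun kw => PySem.Chars.startswith (m.drop i) kw))

-- ===== PRECONDITION & SPEC =====
def Spec_is_start_questions_request (message : String) (out : Bool) : Prop := out = is_start_questions_request_alt message
instance (message : String) (out : Bool) : Decidable (Spec_is_start_questions_request message out) := by unfold Spec_is_start_questions_request; infer_instance

-- ===== CLAIM (what is proved, stated in full; the proofs are below) =====
def Claim_equal_is_start_questions_request : Prop := ∀ (message : String), Dom_is_start_questions_request message → Spec_is_start_questions_request message (is_start_questions_request message)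

-- ===== LEMMAS AND PROOFS =====

-- 'sub in m' is exactly 'sub starts at some position i ≤ len(m)'
theorem pv_isIn_iff_exists_le (sub m : List Char) :
    PySem.Chars.isIn sub m = true ↔ ∃ i, i ≤ m.length ∧ sub <+: m.drop i := by
  rw [← PySem.Chars.exists_prefix_drop_iff_isIn]
  constructor
  · rintro ⟨j, hj⟩
    by_cases h : j ≤ m.length
    · exact ⟨j, h, hj⟩
    · refine ⟨m.length, le_rfl, ?_⟩
      rwa [List.drop_eq_nil_of_le (by omega : m.length ≤ j),
           ← List.drop_eq_nil_of_le (le_refl m.length)] at hj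
  · rintro ⟨i, _, hi⟩; exact ⟨i, hi⟩

-- ===== VERDICT (by name: the statement is the Claim_ definition above) =====
theorem is_start_questions_request_spec : Claim_equal_is_start_questions_request := by
  intro message _
  unfold Spec_is_start_questions_request is_start_questions_request is_start_questions_request_alt
  set m := PySem.Chars.lower message.toList with hm
  rw [Bool.eq_iff_iff]
  simp only [List.any_eq_true, List.mem_range, PySem.Chars.startswith_iff,
    pv_isIn_iff_exists_le]
  constructor
  · rintro ⟨kw, hkw, i, hi, hpre⟩
    exact ⟨i, by omega, kw, hkw, hpre⟩
  · rintro ⟨i, hi, kw, hkw, hpre⟩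
    exact ⟨kw, hkw, i, by omega, hpre⟩
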